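-- pv_equiv track=rewrite | github.com/paiml/depyler | examples/hard_matrix_linear_algebra.py | mat_extract_lower
-- ===== SOURCE A (Python) =====
-- def mat_extract_lower(a: list[list[int]]) -> list[list[int]]:
--     """Extract the lower triangular part of a matrix (zero out above diagonal)."""
--     n: int = len(a)
--     result: list[list[int]] = []
--     for i in range(n):
--         row: list[int] = []
--         for j in range(n):
--             if j <= i:
--                 row.append(a[i][j])
--             else:
--                 row.append(0)
--         result.append(row)
--     return result
-- ===== SOURCE B (Python) =====
-- def mat_extract_lower(a: list[list[int]]) -> list[list[int]]:
--     """Extract the lower triangular part of a matrix (zero out above diagonal)."""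
--     n = len(a)
--     cols = [[0] * j + [a[i][j] for i in range(j, n)] for j in range(n)]
--     return [list(row) for row in zip(*cols)]
-- ===== Notes on version B (the rewrite author's own statement) =====
-- stated objective: alternative
-- what changed: B builds the result column-major (each column j is j zeros followed by the surviving entries a[j..n-1][j]) and then transposes with zip, instead of A's row-major scan over all n columns with a j<=i branch.
import Mathlib
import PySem

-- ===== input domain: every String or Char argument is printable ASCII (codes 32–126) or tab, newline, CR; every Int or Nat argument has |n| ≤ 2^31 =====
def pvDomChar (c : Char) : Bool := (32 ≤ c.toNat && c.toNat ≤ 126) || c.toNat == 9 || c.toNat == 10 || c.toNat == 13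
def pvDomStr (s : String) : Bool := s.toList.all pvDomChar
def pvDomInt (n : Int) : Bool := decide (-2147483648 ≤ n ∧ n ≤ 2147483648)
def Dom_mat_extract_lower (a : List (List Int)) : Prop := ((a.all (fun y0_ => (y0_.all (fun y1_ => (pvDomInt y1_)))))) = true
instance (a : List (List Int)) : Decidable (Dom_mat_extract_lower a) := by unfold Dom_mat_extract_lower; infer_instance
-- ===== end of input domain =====

-- B assembles the lower triangle column-major (column j = j zeros then a[j..n-1][j]) and
-- transposes with zip, instead of A's row-major scan with a j<=i branch (objective: alternative).

-- ===== PORT A =====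
-- a[i][j] is ported as (a.getD i []).getD j 0; exact under Pre_ (j ≤ i < (a[i]).length on the
-- branch that reads it); Python raises IndexError outside Pre_.
def mat_extract_lower (a : List (List Int)) : List (List Int) :=
  let n := a.length
  (List.range n).map (fun i =>
    (List.range n).map (fun j =>
      if j ≤ i then (a.getD i []).getD j 0 else 0))

-- ===== PORT B =====
-- Port of Python's zip(*ls): rows up to the shortest list's length, row k = the k-th entries.
def pvZipStar (ls : List (List Int)) : List (List Int) :=
  let m := ((ls.map List.length).min?).getD 0
  (List.range m).map (fun k => ls.map (fun col => col.getD k 0))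

def mat_extract_lower_alt (a : List (List Int)) : List (List Int) :=
  let n := a.length
  let cols := (List.range n).map (fun j =>
    List.replicate j 0 ++ (List.range' j (n - j)).map (fun i => (a.getD i []).getD j 0))
  pvZipStar cols

-- ===== PRECONDITION & SPEC =====
-- Pre_ excludes exactly the ragged inputs on which Python A raises IndexError: some row i is
-- shorter than i+1, so a[i][i] does not exist.
def Pre_mat_extract_lower (a : List (List Int)) : Prop :=
  ∀ i ∈ List.range a.length, i < (a.getD i []).length
instance (a : List (List Int)) : Decidable (Pre_mat_extract_lower a) := by
  unfold Pre_mat_extract_lower; infer_instance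

def pvWitness_mat_extract_lower : List (List Int) := [[1, 2], [3, 4]]

def Spec_mat_extract_lower (a : List (List Int)) (out : List (List Int)) : Prop := out = mat_extract_lower_alt a
instance (a : List (List Int)) (out : List (List Int)) : Decidable (Spec_mat_extract_lower a out) := by unfold Spec_mat_extract_lower; infer_instance

-- ===== CLAIM =====
def Claim_equal_mat_extract_lower : Prop := ∀ (a : List (List Int)), Dom_mat_extract_lower a → Pre_mat_extract_lower a → Spec_mat_extract_lower a (mat_extract_lower a)

-- ===== LEMMAS AND PROOFS =====

-- Every column B builds has length n, so zip's truncation bound is n itself.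
theorem cols_len (a : List (List Int)) (j : Nat) (hj : j < a.length) :
    (List.replicate j (0:Int) ++ (List.range' j (a.length - j)).map (fun i => (a.getD i []).getD j 0)).length = a.length := by
  simp; omega

theorem min?_replicate (k n : Nat) : (List.replicate (k+1) n).min? = some n := by
  induction k with
  | zero => simp [List.min?]
  | succ k ih =>
    rw [List.replicate_succ] at ih ⊢
    rw [List.replicate_succ, List.min?_cons, ih]
    simp

-- Entry k of column j equals A's branch value (for k, j < n).
theorem col_entry (a : List (List Int)) (j k : Nat) (hj : j < a.length) (hk : k < a.length) :
    (List.replicate j (0:Int) ++ (List.range' j (a.length - j)).map (fun i => (a.getD i []).getD j 0)).getD k 0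
      = (if j ≤ k then (a.getD k []).getD j 0 else 0) := by
  rw [List.getD_eq_getElem?_getD]
  by_cases h : k < j
  · rw [List.getElem?_append_left (by simpa using h)]
    simp [h, Nat.not_le.mpr h]
  · rw [Nat.not_lt] at h
    rw [List.getElem?_append_right (by simpa using h)]
    simp only [List.length_replicate, List.getElem?_map]
    have hlt : k - j < a.length - j := by omega
    simp [hlt, h, Nat.add_sub_cancel' h]

-- ===== VERDICT =====
theorem mat_extract_lower_spec : Claim_equal_mat_extract_lower := by
  intro a _ _
  unfold Spec_mat_extract_lower mat_extract_lower mat_extract_lower_alt pvZipStar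
  rcases Nat.eq_zero_or_pos a.length with h0 | hpos
  · simp [h0]
  · have hm : ((((List.range a.length).map (fun j =>
        List.replicate j (0:Int) ++ (List.range' j (a.length - j)).map (fun i => (a.getD i []).getD j 0))).map List.length).min?).getD 0 = a.length := by
      have : ((List.range a.length).map (fun j =>
          List.replicate j (0:Int) ++ (List.range' j (a.length - j)).map (fun i => (a.getD i []).getD j 0))).map List.length
          = List.replicate a.length a.length := by
        rw [List.map_map, List.eq_replicate_iff]
        refine ⟨by simp, ?_⟩
        intro x hx
        simp only [List.mem_map, List.mem_range, Function.comp] at hx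
        obtain ⟨j, hj, hx⟩ := hx
        rw [← hx, cols_len a j hj]
      rw [this]
      obtain ⟨k, hk⟩ := Nat.exists_eq_succ_of_ne_zero (Nat.pos_iff_ne_zero.mp hpos)
      rw [hk, min?_replicate]
      rfl
    simp only [List.map_map] at hm ⊢
    rw [hm]
    apply List.map_congr_left
    intro k hk
    simp only [List.mem_range] at hk
    apply List.map_congr_left
    intro j hj
    simp only [List.mem_range] at hj
    simp only [Function.comp]
    exact (col_entry a j k hj hk).symm
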